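-- pv_equiv track=rewrite | github.com/AWESOME04/Python-Programming-with-Maurya | ASSIGNMENT 3/main.py | remove_long_words_gen
-- ===== SOURCE A (Python) =====
-- def remove_long_words_gen(items):
--     max_len = 0
--     cache = []
--     for item in items:
--         size = len(item)
--         if size > max_len:
--             # this item is now the longest item
--             max_len = size
--             # anything previously seen can be yielded and purged from the cache
--             yield from (cached for _, cached in cache)
--             cache = [(size, item)]
--         else:
--             # this item might be smaller than the max item,
--             # but cannot be yielded yet to preserve the collection's order
--             cache.append((size, item))
--             # and now cleanup
--     for size, item in cache:
--         if size != max_len: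
--                 yield item
-- ===== SOURCE B (Python) =====
-- def remove_long_words_gen(items):
--     lst = list(items)
--     if not lst:
--         return
--     max_len = max(len(x) for x in lst)
--     for x in lst:
--         if len(x) != max_len:
--             yield x
-- ===== Notes on version B (the rewrite author's own statement) =====
-- stated objective: simpler
-- what changed: Replaces the single-pass cache-and-purge generator (which buffers (len, item) pairs and flushes them whenever a new maximum appears) by two plain passes: compute the maximum length once, then yield the items whose length differs from it.
import Mathlib
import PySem

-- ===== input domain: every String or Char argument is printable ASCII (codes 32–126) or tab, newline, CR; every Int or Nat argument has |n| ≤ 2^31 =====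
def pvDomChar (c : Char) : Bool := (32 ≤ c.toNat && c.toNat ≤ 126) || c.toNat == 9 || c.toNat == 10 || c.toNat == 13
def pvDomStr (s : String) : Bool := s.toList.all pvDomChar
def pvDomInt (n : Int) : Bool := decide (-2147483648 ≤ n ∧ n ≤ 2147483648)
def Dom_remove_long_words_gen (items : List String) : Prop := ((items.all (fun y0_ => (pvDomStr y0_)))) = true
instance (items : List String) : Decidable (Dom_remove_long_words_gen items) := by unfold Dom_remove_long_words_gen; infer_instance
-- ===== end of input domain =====

-- B replaces A's single-pass cache-and-purge generator by two plain passes (max length, then filter);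
-- objective: simpler. Both versions are proved to yield the same list of items.

-- ===== PORT A =====
-- state of A's loop: (max_len, cache, yielded-so-far)
def pvAStep (s : Int × List (Int × String) × List String) (item : String) :
    Int × List (Int × String) × List String :=
  let size := PySem.Str.len item
  if size > s.1 then
    -- new longest item: yield everything cached, restart the cache
    (size, [(size, item)], s.2.2 ++ s.2.1.map (fun p => p.2))
  else
    (s.1, s.2.1 ++ [(size, item)], s.2.2)

-- A's trailing loop: emit yielded items, then cached items whose size differs from max_len
def pvFinish (st : Int × List (Int × String) × List String) : List String :=
  st.2.2 ++ st.2.1.foldl (fun acc p => if p.1 != st.1 then acc ++ [p.2] else acc) []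

def remove_long_words_gen (items : List String) : List String :=
  pvFinish (items.foldl pvAStep (0, [], []))

-- ===== PORT B =====
def remove_long_words_gen_alt (items : List String) : List String :=
  match items with
  | [] => []
  | _ :: _ =>
    match PySem.List.max? (items.map (fun x => PySem.Str.len x)) (fun v => v) with
    | none => []
    | some m => items.filter (fun x => PySem.Str.len x != m)

-- ===== PRECONDITION & SPEC =====
def Spec_remove_long_words_gen (items : List String) (out : List String) : Prop := out = remove_long_words_gen_alt items
instance (items : List String) (out : List String) : Decidable (Spec_remove_long_words_gen items out) := by unfold Spec_remove_long_words_gen; infer_instance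

-- ===== CLAIM (what is proved, stated in full; the proofs are below) =====
def Claim_equal_remove_long_words_gen : Prop := ∀ (items : List String), Dom_remove_long_words_gen items → Spec_remove_long_words_gen items (remove_long_words_gen items)

-- ===== LEMMAS AND PROOFS =====

theorem pv_len_nonneg (s : String) : 0 ≤ PySem.Str.len s := by
  simp [PySem.Str.len_eq]

-- running max of A's loop, starting from M
def pvRunMax (M : Int) (l : List String) : Int :=
  l.foldl (fun m x => max m (PySem.Str.len x)) M

theorem pvRunMax_nil (M : Int) : pvRunMax M [] = M := rfl

theorem pvRunMax_cons (M : Int) (x : String) (l : List String) :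
    pvRunMax M (x :: l) = pvRunMax (max M (PySem.Str.len x)) l := rfl

theorem le_pvRunMax (M : Int) (l : List String) : M ≤ pvRunMax M l := by
  induction l generalizing M with
  | nil => simp [pvRunMax_nil]
  | cons x t ih =>
      have := ih (max M (PySem.Str.len x))
      rw [pvRunMax_cons]
      exact le_trans (le_max_left _ _) this

-- A's trailing loop on a well-formed cache is a filter on the lengths
theorem pv_cache_final (M : Int) (cache : List (Int × String)) (acc : List String)
    (hc : ∀ p ∈ cache, p.1 = PySem.Str.len p.2) :
    cache.foldl (fun acc p => if p.1 != M then acc ++ [p.2] else acc) acc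
      = acc ++ (cache.map (fun p => p.2)).filter (fun x => PySem.Str.len x != M) := by
  induction cache generalizing acc with
  | nil => simp
  | cons p t ih =>
      have hp := hc p (List.mem_cons_self ..)
      have ht : ∀ q ∈ t, q.1 = PySem.Str.len q.2 := fun q hq => hc q (List.mem_cons_of_mem _ hq)
      by_cases h : p.1 = M
      · have hl : PySem.Str.len p.2 = M := hp.symm.trans h
        have ih' := ih acc ht
        simp only [List.foldl_cons, List.map_cons, List.filter_cons, hl, h, bne_self_eq_false,
          Bool.false_eq_true, if_false]
        exact ih'
      · have hl : (PySem.Str.len p.2 != M) = true := by rw [← hp]; simpa using h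
        have hf : (p.1 != M) = true := by simpa using h
        have ih' := ih (acc ++ [p.2]) ht
        simp only [List.foldl_cons, List.map_cons, List.filter_cons, hl, hf, if_true]
        rw [ih']
        simp

-- main invariant of A's loop
theorem pv_aloop (l : List String) (M : Int) (cache : List (Int × String)) (out : List String)
    (hc : ∀ p ∈ cache, p.1 = PySem.Str.len p.2 ∧ p.1 ≤ M)
    (ho : ∀ x ∈ out, PySem.Str.len x < M) :
    pvFinish (l.foldl pvAStep (M, cache, out))
      = out ++ (cache.map (fun p => p.2) ++ l).filter (fun x => PySem.Str.len x != pvRunMax M l) := by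
  induction l generalizing M cache out with
  | nil =>
      show out ++ cache.foldl (fun acc p => if p.1 != M then acc ++ [p.2] else acc) [] = _
      rw [pv_cache_final M cache [] (fun p hp => (hc p hp).1)]
      simp [pvRunMax_nil]
  | cons x t ih =>
      simp only [List.foldl_cons, pvRunMax_cons]
      by_cases hgt : PySem.Str.len x > M
      · have hstep : pvAStep (M, cache, out) x
            = (PySem.Str.len x, [(PySem.Str.len x, x)], out ++ cache.map (fun p => p.2)) := by
          show (if PySem.Str.len x > M then _ else _) = _
          rw [if_pos hgt]
        rw [hstep]
        have hmax : max M (PySem.Str.len x) = PySem.Str.len x := max_eq_right (le_of_lt hgt)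
        rw [hmax]
        rw [ih (PySem.Str.len x) [(PySem.Str.len x, x)] (out ++ cache.map (fun p => p.2))
          (by intro p hp; simp at hp; simp [hp])
          (by
            intro y hy
            rcases List.mem_append.mp hy with h | h
            · exact lt_trans (ho y h) hgt
            · rcases List.mem_map.mp h with ⟨p, hp, rfl⟩
              exact lt_of_le_of_lt (((hc p hp).1) ▸ (hc p hp).2) hgt)]
        have hkeep : (cache.map (fun p => p.2)).filter
            (fun y => PySem.Str.len y != pvRunMax (PySem.Str.len x) t) = cache.map (fun p => p.2) := by
          apply List.filter_eq_self.mpr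
          intro y hy
          rcases List.mem_map.mp hy with ⟨p, hp, rfl⟩
          have h1 : PySem.Str.len p.2 ≤ M := ((hc p hp).1) ▸ (hc p hp).2
          have h2 : M < pvRunMax (PySem.Str.len x) t :=
            lt_of_lt_of_le hgt (le_pvRunMax _ _)
          simp only [bne_iff_ne, ne_eq]
          omega
        simp [List.filter_append, List.filter_cons]
        simpa using hkeep.symm
      · have hstep : pvAStep (M, cache, out) x
            = (M, cache ++ [(PySem.Str.len x, x)], out) := by
          show (if PySem.Str.len x > M then _ else _) = _
          rw [if_neg hgt]
        rw [hstep]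
        have hmax : max M (PySem.Str.len x) = M := max_eq_left (by omega)
        rw [hmax]
        rw [ih M (cache ++ [(PySem.Str.len x, x)]) out
          (by
            intro p hp
            rcases List.mem_append.mp hp with h | h
            · exact hc p h
            · have hpe : p = (PySem.Str.len x, x) := by simpa using h
              subst hpe
              exact ⟨rfl, by omega⟩)
          ho]
        simp

-- A computes "filter by ≠ running max from 0"
theorem pv_a_char (items : List String) :
    remove_long_words_gen items
      = items.filter (fun x => PySem.Str.len x != pvRunMax 0 items) := by
  have h := pv_aloop items 0 [] [] (by simp) (by simp)
  simpa [remove_long_words_gen] using h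

-- ===== VERDICT (by name: the statement is the Claim_ definition above) =====
theorem remove_long_words_gen_spec : Claim_equal_remove_long_words_gen := by
  intro items _
  show remove_long_words_gen items = remove_long_words_gen_alt items
  rw [pv_a_char]
  cases items with
  | nil => simp [remove_long_words_gen_alt]
  | cons x t =>
      have hm : PySem.List.max? ((x :: t).map (fun y => PySem.Str.len y)) (fun v => v)
          = some ((t.map (fun y => PySem.Str.len y)).foldl max (PySem.Str.len x)) := by
        simp only [List.map_cons]
        exact PySem.List.max?_id_cons ..
      have hrm : pvRunMax 0 (x :: t)
          = (t.map (fun y => PySem.Str.len y)).foldl max (PySem.Str.len x) := by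
        rw [pvRunMax_cons, max_eq_right (pv_len_nonneg x)]
        simp [pvRunMax, List.foldl_map]
      simp only [remove_long_words_gen_alt, hm, hrm]
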